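-- pv_equiv track=rewrite | github.com/DorPeretzRepo/nmpaAgent | nmap_agent/attack_vectors.py | _compute_risk_factors
-- ===== SOURCE A (Python) =====
-- from typing import Dict, List, Mapping
--
-- def _compute_risk_factors(services: Mapping[int, str]) -> Dict[str, bool]:
--     lowered = {port: (name or "").lower() for port, name in services.items()}
--     has_remote_desktop = any(port in {3389, 5900} or "ms-wbt" in name for port, name in lowered.items())
--     has_smb = any(port in {139, 445} for port in lowered)
--     has_winrm = any(port in {5985, 5986} or "wsman" in name for port, name in lowered.items())
--     has_ftp = any(port == 21 or "ftp" in name for port, name in lowered.items())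
--     has_telnet = any(port == 23 or "telnet" in name for port, name in lowered.items())
--     has_snmp = any(port == 161 or "snmp" in name for port, name in lowered.items())
--     has_upnp = any(port == 1900 or "upnp" in name for port, name in lowered.items())
--     has_web = any(port in {80, 443, 8080, 8443} or "http" in name for port, name in lowered.items())
--     has_rtsp = any(port == 554 or "rtsp" in name for port, name in lowered.items())
--
--     return {
--         "remote_admin": has_remote_desktop or has_winrm,
--         "smb": has_smb,
--         "winrm": has_winrm,
--         "ftp": has_ftp,
--         "telnet": has_telnet,
--         "snmp": has_snmp,
--         "upnp": has_upnp,
--         "web_ports": has_web,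
--         "iot_surface": has_web and (has_snmp or has_upnp or has_rtsp),
--         "weak_protocols": has_telnet or has_ftp,
--     }
-- ===== SOURCE B (Python) =====
-- def _compute_risk_factors(services):
--     rd = smb = winrm = ftp = telnet = snmp = upnp = web = rtsp = False
--     for port, name in services.items():
--         n = (name or "").lower()
--         if port in (3389, 5900) or "ms-wbt" in n:
--             rd = True
--         if port in (139, 445):
--             smb = True
--         if port in (5985, 5986) or "wsman" in n:
--             winrm = True
--         if port == 21 or "ftp" in n:
--             ftp = True
--         if port == 23 or "telnet" in n:
--             telnet = True
--         if port == 161 or "snmp" in n: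
--             snmp = True
--         if port == 1900 or "upnp" in n:
--             upnp = True
--         if port in (80, 443, 8080, 8443) or "http" in n:
--             web = True
--         if port == 554 or "rtsp" in n:
--             rtsp = True
--     return {
--         "remote_admin": rd or winrm,
--         "smb": smb,
--         "winrm": winrm,
--         "ftp": ftp,
--         "telnet": telnet,
--         "snmp": snmp,
--         "upnp": upnp,
--         "web_ports": web,
--         "iot_surface": web and (snmp or upnp or rtsp),
--         "weak_protocols": telnet or ftp,
--     }
-- ===== Notes on version B (the rewrite author's own statement) =====
-- stated objective: faster
-- what changed: A's nine independent any()-scans over the service dict (lowering every name in a separate pre-pass) are replaced by a single loop over services.items() that lowers each name once and updates nine boolean flags as it goes, then builds the same result dict.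
import Mathlib
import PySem

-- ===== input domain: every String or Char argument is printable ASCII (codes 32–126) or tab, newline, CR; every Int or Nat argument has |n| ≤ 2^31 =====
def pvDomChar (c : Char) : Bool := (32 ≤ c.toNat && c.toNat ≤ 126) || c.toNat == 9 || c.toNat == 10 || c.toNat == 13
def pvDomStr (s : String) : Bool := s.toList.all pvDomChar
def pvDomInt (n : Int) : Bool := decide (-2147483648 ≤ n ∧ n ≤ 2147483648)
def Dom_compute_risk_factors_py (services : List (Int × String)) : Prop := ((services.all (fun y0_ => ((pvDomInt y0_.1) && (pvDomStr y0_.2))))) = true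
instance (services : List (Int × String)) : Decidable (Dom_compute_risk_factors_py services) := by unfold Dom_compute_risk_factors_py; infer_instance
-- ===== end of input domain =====

-- B replaces A's nine independent any-scans of the service dict by a single loop that lowers
-- each name once and updates nine boolean flags as it goes (objective: simpler single pass).

-- ===== PORT A =====
-- A receives the pairs as a Python dict (last value wins per key, first position kept): PySem.Dict.ofList.
def compute_risk_factors_py (services : List (Int × String)) : List (String × Bool) :=
  let d : PySem.Dict Int String := PySem.Dict.ofList services
  -- lowered = {port: (name or "").lower() …}; for a string value, (name or "") is name itself.
  let lowered : PySem.Dict Int String :=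
    PySem.Dict.ofList (d.items.map (fun pn => (pn.1, PySem.Str.lower pn.2)))
  let has_remote_desktop := lowered.items.any (fun pn => (pn.1 == 3389 || pn.1 == 5900) || PySem.Str.isIn "ms-wbt" pn.2)
  let has_smb := lowered.keys.any (fun p => p == 139 || p == 445)
  let has_winrm := lowered.items.any (fun pn => (pn.1 == 5985 || pn.1 == 5986) || PySem.Str.isIn "wsman" pn.2)
  let has_ftp := lowered.items.any (fun pn => pn.1 == 21 || PySem.Str.isIn "ftp" pn.2)
  let has_telnet := lowered.items.any (fun pn => pn.1 == 23 || PySem.Str.isIn "telnet" pn.2)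
  let has_snmp := lowered.items.any (fun pn => pn.1 == 161 || PySem.Str.isIn "snmp" pn.2)
  let has_upnp := lowered.items.any (fun pn => pn.1 == 1900 || PySem.Str.isIn "upnp" pn.2)
  let has_web := lowered.items.any (fun pn => (pn.1 == 80 || pn.1 == 443 || pn.1 == 8080 || pn.1 == 8443) || PySem.Str.isIn "http" pn.2)
  let has_rtsp := lowered.items.any (fun pn => pn.1 == 554 || PySem.Str.isIn "rtsp" pn.2)
  [("remote_admin", has_remote_desktop || has_winrm),
   ("smb", has_smb),
   ("winrm", has_winrm),
   ("ftp", has_ftp),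
   ("telnet", has_telnet),
   ("snmp", has_snmp),
   ("upnp", has_upnp),
   ("web_ports", has_web),
   ("iot_surface", has_web && (has_snmp || has_upnp || has_rtsp)),
   ("weak_protocols", has_telnet || has_ftp)]

-- ===== PORT B =====
structure PvFlags where
  rd : Bool
  smb : Bool
  winrm : Bool
  ftp : Bool
  telnet : Bool
  snmp : Bool
  upnp : Bool
  web : Bool
  rtsp : Bool
deriving Repr, DecidableEq

-- one loop iteration of B: lower the name once, update each flag ('if cond: flag = True' ≡ flag || cond)
def pvStep (f : PvFlags) (pn : Int × String) : PvFlags :=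
  let n := PySem.Str.lower pn.2
  { rd := f.rd || ((pn.1 == 3389 || pn.1 == 5900) || PySem.Str.isIn "ms-wbt" n),
    smb := f.smb || (pn.1 == 139 || pn.1 == 445),
    winrm := f.winrm || ((pn.1 == 5985 || pn.1 == 5986) || PySem.Str.isIn "wsman" n),
    ftp := f.ftp || (pn.1 == 21 || PySem.Str.isIn "ftp" n),
    telnet := f.telnet || (pn.1 == 23 || PySem.Str.isIn "telnet" n),
    snmp := f.snmp || (pn.1 == 161 || PySem.Str.isIn "snmp" n),
    upnp := f.upnp || (pn.1 == 1900 || PySem.Str.isIn "upnp" n),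
    web := f.web || ((pn.1 == 80 || pn.1 == 443 || pn.1 == 8080 || pn.1 == 8443) || PySem.Str.isIn "http" n),
    rtsp := f.rtsp || (pn.1 == 554 || PySem.Str.isIn "rtsp" n) }

def compute_risk_factors_py_alt (services : List (Int × String)) : List (String × Bool) :=
  let f := (PySem.Dict.ofList services).items.foldl pvStep
    ⟨false, false, false, false, false, false, false, false, false⟩
  [("remote_admin", f.rd || f.winrm),
   ("smb", f.smb),
   ("winrm", f.winrm),
   ("ftp", f.ftp),
   ("telnet", f.telnet),
   ("snmp", f.snmp),
   ("upnp", f.upnp),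
   ("web_ports", f.web),
   ("iot_surface", f.web && (f.snmp || f.upnp || f.rtsp)),
   ("weak_protocols", f.telnet || f.ftp)]

-- ===== PRECONDITION & SPEC =====
def Spec_compute_risk_factors_py (services : List (Int × String)) (out : List (String × Bool)) : Prop := out = compute_risk_factors_py_alt services
instance (services : List (Int × String)) (out : List (String × Bool)) : Decidable (Spec_compute_risk_factors_py services out) := by unfold Spec_compute_risk_factors_py; infer_instance

-- ===== CLAIM (what is proved, stated in full; the proofs are below) =====
def Claim_equal_compute_risk_factors_py : Prop := ∀ (services : List (Int × String)), Dom_compute_risk_factors_py services → Spec_compute_risk_factors_py services (compute_risk_factors_py services)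

-- ===== LEMMAS AND PROOFS =====

-- B's single fold computes exactly the nine any-scans (each seeded by the accumulator).
theorem pvStep_foldl (l : List (Int × String)) (f0 : PvFlags) :
    l.foldl pvStep f0 =
      { rd := f0.rd || l.any (fun pn => (pn.1 == 3389 || pn.1 == 5900) || PySem.Str.isIn "ms-wbt" (PySem.Str.lower pn.2)),
        smb := f0.smb || l.any (fun pn => pn.1 == 139 || pn.1 == 445),
        winrm := f0.winrm || l.any (fun pn => (pn.1 == 5985 || pn.1 == 5986) || PySem.Str.isIn "wsman" (PySem.Str.lower pn.2)),
        ftp := f0.ftp || l.any (fun pn => pn.1 == 21 || PySem.Str.isIn "ftp" (PySem.Str.lower pn.2)),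
        telnet := f0.telnet || l.any (fun pn => pn.1 == 23 || PySem.Str.isIn "telnet" (PySem.Str.lower pn.2)),
        snmp := f0.snmp || l.any (fun pn => pn.1 == 161 || PySem.Str.isIn "snmp" (PySem.Str.lower pn.2)),
        upnp := f0.upnp || l.any (fun pn => pn.1 == 1900 || PySem.Str.isIn "upnp" (PySem.Str.lower pn.2)),
        web := f0.web || l.any (fun pn => (pn.1 == 80 || pn.1 == 443 || pn.1 == 8080 || pn.1 == 8443) || PySem.Str.isIn "http" (PySem.Str.lower pn.2)),
        rtsp := f0.rtsp || l.any (fun pn => pn.1 == 554 || PySem.Str.isIn "rtsp" (PySem.Str.lower pn.2)) } := by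
  induction l generalizing f0 with
  | nil => simp
  | cons x t ih => simp [pvStep, ih, Bool.or_assoc]

-- the keys of a dict's items list are distinct, so re-packing the lowered items as a dict keeps them
theorem pv_items_ofList_of_nodup (l : List (Int × String)) (h : (l.map (·.1)).Nodup) :
    (PySem.Dict.ofList l).items = l := by
  have := PySem.Dict.items_foldl_insert_fresh (l := l) (k := Prod.fst) (v := Prod.snd)
    (d := (PySem.Dict.empty : PySem.Dict Int String)) (by simp) h
  simpa [PySem.Dict.ofList] using this

-- ===== VERDICT (by name: the statement is the Claim_ definition above) =====
theorem compute_risk_factors_py_spec : Claim_equal_compute_risk_factors_py := by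
  intro services _
  unfold Spec_compute_risk_factors_py compute_risk_factors_py compute_risk_factors_py_alt
  have hnd : (((PySem.Dict.ofList services : PySem.Dict Int String).items.map
      (fun pn => (pn.1, PySem.Str.lower pn.2))).map (·.1)).Nodup := by
    have h := PySem.Dict.nodup_keys_ofList (ps := services) (κ := Int) (ν := String)
    simpa [List.map_map, Function.comp, PySem.Dict.keys] using h
  simp only [pv_items_ofList_of_nodup _ hnd, pvStep_foldl, PySem.Dict.keys, List.any_map]
  simp [Function.comp_def]
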